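-- pv_equiv track=rewrite | github.com/ChenNeuro/ChenNeuro | DSAL/代码/02499:Binary Tree.py | solve
-- ===== SOURCE A (Python) =====
-- def solve(a, b):
--     l = r = 0
--     while a != 1 and b != 1:
--         if a > b:
--             quotient = a // b
--             a -= quotient * b
--             l += quotient
--         else:
--             quotient = b // a
--             b -= quotient * a
--             r += quotient
--     return (l + a - 1, r + b - 1)
-- ===== SOURCE B (Python) =====
-- def split_sums(qs):
--     # (sum of even-index entries, sum of odd-index entries)
--     if not qs:
--         return (0, 0)
--     e, o = split_sums(qs[1:])
--     return (qs[0] + o, e)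
--
--
-- def solve(a, b):
--     if a == 1 or b == 1:
--         return (a - 1, b - 1)
--     # continued-fraction quotients of a/b by Euclid's algorithm
--     qs = []
--     x, y = a, b
--     while y != 0:
--         qs.append(x // y)
--         x, y = y, x % y
--     e, o = split_sums(qs)
--     # the last quotient's side absorbs the final step to (1,1)
--     return (e - 1, o) if len(qs) % 2 else (e, o - 1)
-- ===== Notes on version B (the rewrite author's own statement) =====
-- stated objective: alternative
-- what changed: Instead of A's comparison-driven subtract loop threading two accumulators, B runs the standard ordered Euclidean algorithm once to collect the continued-fraction quotient list of a/b, then splits it into even/odd-position sums and subtracts 1 on the side of the last quotient.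
import Mathlib
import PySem

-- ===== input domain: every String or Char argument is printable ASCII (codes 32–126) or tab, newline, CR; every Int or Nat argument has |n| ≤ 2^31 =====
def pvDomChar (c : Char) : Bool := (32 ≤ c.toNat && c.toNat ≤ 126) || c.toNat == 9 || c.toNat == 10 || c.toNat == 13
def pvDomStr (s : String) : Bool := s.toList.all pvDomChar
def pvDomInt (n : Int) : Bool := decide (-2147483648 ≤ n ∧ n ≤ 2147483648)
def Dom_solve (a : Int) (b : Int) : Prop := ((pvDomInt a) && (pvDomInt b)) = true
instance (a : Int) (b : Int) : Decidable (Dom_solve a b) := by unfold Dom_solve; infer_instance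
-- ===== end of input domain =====

-- B replaces A's comparison-driven subtract loop (two threaded accumulators,
-- final +a-1/+b-1) by one ordered Euclidean pass collecting the continued-fraction
-- quotients of a/b, then a recursive even/odd-position split of that list with a
-- -1 on the side of the last quotient (objective: alternative, same cost).


-- ===== PORT A =====
-- A's while-loop, made total with a fuel counter; fuel a.toNat + b.toNat is
-- enough on every input satisfying Pre_solve (each iteration shrinks a + b).
def solveLoopA (fuel : Nat) (a b l r : Int) : Int × Int :=
  match fuel with
  | 0 => (l + a - 1, r + b - 1)
  | fuel + 1 =>
    if a ≠ 1 ∧ b ≠ 1 then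
      if a > b then
        let q := PySem.Int.floordiv a b
        solveLoopA fuel (a - q * b) b (l + q) r
      else
        let q := PySem.Int.floordiv b a
        solveLoopA fuel a (b - q * a) l (r + q)
    else (l + a - 1, r + b - 1)

def solve (a : Int) (b : Int) : Int × Int := solveLoopA (a.toNat + b.toNat) a b 0 0

-- ===== PORT B =====
-- Source B's Euclid loop building the quotient list, made total with the same fuel
-- bound (enough on every input satisfying Pre_solve: y strictly decreases).
def euclidQs (fuel : Nat) (x y : Int) : List Int :=
  match fuel with
  | 0 => []
  | fuel + 1 =>
    if y ≠ 0 then PySem.Int.floordiv x y :: euclidQs fuel y (PySem.Int.mod x y)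
    else []

-- Source B's split_sums: (sum of even-index entries, sum of odd-index entries).
def splitSums (qs : List Int) : Int × Int :=
  match qs with
  | [] => (0, 0)
  | q :: qs => ((splitSums qs).2 + q, (splitSums qs).1)

def solve_alt (a : Int) (b : Int) : Int × Int :=
  if a = 1 ∨ b = 1 then (a - 1, b - 1)
  else
    let qs := euclidQs (a.toNat + b.toNat) a b
    let eo := splitSums qs
    if qs.length % 2 = 1 then (eo.1 - 1, eo.2) else (eo.1, eo.2 - 1)

-- ===== PRECONDITION & SPEC =====
-- Pre_solve is exactly where Python A returns: with a = 1 or b = 1 the loop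
-- never runs; otherwise it needs positive coprime inputs, else it raises
-- ZeroDivisionError or loops forever.
def Pre_solve (a : Int) (b : Int) : Prop :=
  (1 ≤ a ∧ 1 ≤ b ∧ Int.gcd a b = 1) ∨ a = 1 ∨ b = 1
instance (a : Int) (b : Int) : Decidable (Pre_solve a b) := by unfold Pre_solve; infer_instance
def pvWitness_solve : Int × Int := (8, 5)

def Spec_solve (a : Int) (b : Int) (out : Int × Int) : Prop := out = solve_alt a b
instance (a : Int) (b : Int) (out : Int × Int) : Decidable (Spec_solve a b out) := by unfold Spec_solve; infer_instance

-- ===== CLAIM (what is proved, stated in full; the proofs are below) =====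
def Claim_equal_solve : Prop := ∀ (a : Int) (b : Int), Dom_solve a b → Pre_solve a b → Spec_solve a b (solve a b)

-- ===== LEMMAS AND PROOFS =====

-- B's finishing computation as a function of the quotient list.
def finishB (l r : Int) (qs : List Int) : Int × Int :=
  if qs.length % 2 = 1 then (l + (splitSums qs).1 - 1, r + (splitSums qs).2)
  else (l + (splitSums qs).1, r + (splitSums qs).2 - 1)

theorem finishB_cons (l r c : Int) (qs : List Int) :
    finishB l r (c :: qs) = ((finishB r (l + c) qs).2, (finishB r (l + c) qs).1) := by
  unfold finishB
  rcases Nat.mod_two_eq_zero_or_one qs.length with h | h <;>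
    simp [splitSums, List.length_cons, Nat.add_mod, h] <;> ring

-- euclidQs is fuel-insensitive once the fuel exceeds the second argument.
theorem euclidQs_fuel (g g' : Nat) (x y : Int) (hy : 0 ≤ y)
    (h1 : y.toNat < g) (h2 : y.toNat < g') : euclidQs g x y = euclidQs g' x y := by
  induction g generalizing g' x y with
  | zero => omega
  | succ g ih =>
    match g', h2 with
    | g' + 1, h2 =>
      by_cases h : y = 0
      · simp [euclidQs, h]
      · have hypos : 0 < y := lt_of_le_of_ne hy (Ne.symm h)
        have hm0 : 0 ≤ PySem.Int.mod x y := PySem.Int.mod_nonneg x hypos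
        have hmlt : PySem.Int.mod x y < y := PySem.Int.mod_lt x hypos
        simp only [euclidQs, if_pos (by exact h)]
        have := ih g' y (PySem.Int.mod x y) hm0 (by omega) (by omega)
        rw [this]

-- Normal exit of A's loop: once a side is 1 any fuel returns the closing tuple.
theorem loopA_exit (f : Nat) (a b l r : Int) (h : a = 1 ∨ b = 1) :
    solveLoopA f a b l r = (l + a - 1, r + b - 1) := by
  cases f with
  | zero => rfl
  | succ f => simp only [solveLoopA, if_neg (show ¬ (a ≠ 1 ∧ b ≠ 1) by tauto)]

-- With a divisor ≥ 2 coprime to the dividend, the remainder cannot vanish.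
theorem coprime_mod_ne (a b : Int) (hb : 2 ≤ b) (h : Int.gcd a b = 1) :
    PySem.Int.mod a b ≠ 0 := by
  intro h0
  have hdvd : b ∣ a := (PySem.Int.mod_eq_zero_iff_dvd a b).mp h0
  have hd : b.natAbs ∣ Int.gcd a b :=
    Nat.dvd_gcd (Int.natAbs_dvd_natAbs.mpr hdvd) dvd_rfl
  rw [h] at hd
  have := Nat.le_of_dvd one_pos hd
  omega

-- Main bisimulation: on positive coprime states, A's loop result is B's
-- finishing computation applied to the Euclid quotient list of the state.
theorem loopA_eq_finishB (f : Nat) :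
    ∀ (g : Nat) (a b l r : Int), 1 ≤ a → 1 ≤ b → Int.gcd a b = 1 →
      a.toNat + b.toNat ≤ f → a.toNat + b.toNat < g →
      solveLoopA f a b l r = finishB l r (euclidQs g a b) := by
  induction f with
  | zero => intro g a b l r ha hb _ hf _; omega
  | succ f ih =>
    intro g a b l r ha hb hg hf hgf
    obtain ⟨g1, rfl⟩ : ∃ g1, g = g1 + 1 := ⟨g - 1, by omega⟩
    by_cases hb1 : b = 1
    · subst hb1
      rw [loopA_exit _ _ _ _ _ (Or.inr rfl)]
      have h1 : PySem.Int.floordiv a 1 = a := by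
        rw [PySem.Int.floordiv_eq_ediv_of_pos one_pos, Int.ediv_one]
      have h2 : PySem.Int.mod a 1 = 0 := by
        rw [PySem.Int.mod_eq_emod_of_pos one_pos, Int.emod_one]
      have h3 : euclidQs g1 (1 : Int) 0 = [] := by cases g1 <;> simp [euclidQs]
      simp only [euclidQs, if_pos (show (1 : Int) ≠ 0 by norm_num), h1, h2, h3]
      simp [finishB, splitSums]
    by_cases ha1 : a = 1
    · subst ha1
      have hb2 : 2 ≤ b := by omega
      rw [loopA_exit _ _ _ _ _ (Or.inl rfl)]
      have hq : PySem.Int.floordiv 1 b = 0 := by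
        rw [PySem.Int.floordiv_eq_ediv_of_pos (by omega)]
        exact Int.ediv_eq_zero_of_lt (by omega) (by omega)
      have hm : PySem.Int.mod 1 b = 1 := by
        rw [PySem.Int.mod_eq_emod_of_pos (by omega)]
        exact Int.emod_eq_of_lt (by omega) (by omega)
      obtain ⟨g2, rfl⟩ : ∃ g2, g1 = g2 + 1 := ⟨g1 - 1, by omega⟩
      have hq2 : PySem.Int.floordiv b 1 = b := by
        rw [PySem.Int.floordiv_eq_ediv_of_pos one_pos, Int.ediv_one]
      have hm2 : PySem.Int.mod b 1 = 0 := by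
        rw [PySem.Int.mod_eq_emod_of_pos one_pos, Int.emod_one]
      have h3 : euclidQs g2 (1 : Int) 0 = [] := by cases g2 <;> simp [euclidQs]
      simp only [euclidQs, if_pos (show b ≠ 0 by omega),
        if_pos (show (1 : Int) ≠ 0 by norm_num), hq, hm, hq2, hm2, h3]
      simp [finishB, splitSums]
    -- main case: a, b ≥ 2, coprime, hence a ≠ b
    have ha2 : 2 ≤ a := by omega
    have hb2 : 2 ≤ b := by omega
    have hne : a ≠ b := by
      intro h; rw [h, Int.gcd_self] at hg; omega
    by_cases hab : b < a
    · -- A reduces a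
      have hmm := PySem.Int.floordiv_mul_add_mod a b
      have hmn : 0 ≤ PySem.Int.mod a b := PySem.Int.mod_nonneg a (by omega)
      have hml : PySem.Int.mod a b < b := PySem.Int.mod_lt a (by omega)
      have hmne : PySem.Int.mod a b ≠ 0 := coprime_mod_ne a b hb2 hg
      have hgcd' : Int.gcd (PySem.Int.mod a b) b = 1 := by
        rw [PySem.Int.mod_eq_emod_of_pos (by omega), Int.gcd_emod]; exact hg
      have hstep : a - PySem.Int.floordiv a b * b = PySem.Int.mod a b := by linarith
      rw [show solveLoopA (f + 1) a b l r
            = solveLoopA f (a - PySem.Int.floordiv a b * b) b (l + PySem.Int.floordiv a b) r from by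
        simp only [solveLoopA, if_pos (show a ≠ 1 ∧ b ≠ 1 from ⟨ha1, hb1⟩),
          if_pos (show a > b from hab)]]
      rw [hstep,
        ih (g1 + 1) (PySem.Int.mod a b) b (l + PySem.Int.floordiv a b) r
          (by omega) (by omega) hgcd' (by omega) (by omega)]
      have hq0 : PySem.Int.floordiv (PySem.Int.mod a b) b = 0 := by
        rw [PySem.Int.floordiv_eq_ediv_of_pos (by omega)]
        exact Int.ediv_eq_zero_of_lt (by omega) (by omega)
      have hm0 : PySem.Int.mod (PySem.Int.mod a b) b = PySem.Int.mod a b := by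
        rw [PySem.Int.mod_eq_emod_of_pos (by omega)]
        exact Int.emod_eq_of_lt (by omega) (by omega)
      rw [show euclidQs (g1 + 1) (PySem.Int.mod a b) b
            = 0 :: euclidQs g1 b (PySem.Int.mod a b) from by
          simp only [euclidQs, if_pos (show b ≠ 0 by omega), hq0, hm0],
        show euclidQs (g1 + 1) a b
            = PySem.Int.floordiv a b :: euclidQs g1 b (PySem.Int.mod a b) from by
          simp only [euclidQs, if_pos (show b ≠ 0 by omega)],
        finishB_cons, finishB_cons]
      simp
    · -- A reduces b
      have hab' : a < b := by omega
      have hmm := PySem.Int.floordiv_mul_add_mod b a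
      have hmn : 0 ≤ PySem.Int.mod b a := PySem.Int.mod_nonneg b (by omega)
      have hml : PySem.Int.mod b a < a := PySem.Int.mod_lt b (by omega)
      have hmne : PySem.Int.mod b a ≠ 0 :=
        coprime_mod_ne b a ha2 (by rw [Int.gcd_comm]; exact hg)
      have hgcd' : Int.gcd a (PySem.Int.mod b a) = 1 := by
        rw [PySem.Int.mod_eq_emod_of_pos (by omega), Int.gcd_comm, Int.gcd_emod,
          Int.gcd_comm]; exact hg
      have hstep : b - PySem.Int.floordiv b a * a = PySem.Int.mod b a := by linarith
      rw [show solveLoopA (f + 1) a b l r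
            = solveLoopA f a (b - PySem.Int.floordiv b a * a) l (r + PySem.Int.floordiv b a) from by
        simp only [solveLoopA, if_pos (show a ≠ 1 ∧ b ≠ 1 from ⟨ha1, hb1⟩),
          if_neg (show ¬ a > b by omega)]]
      obtain ⟨g2, rfl⟩ : ∃ g2, g1 = g2 + 1 := ⟨g1 - 1, by omega⟩
      rw [hstep,
        ih g2 a (PySem.Int.mod b a) l (r + PySem.Int.floordiv b a)
          (by omega) (by omega) hgcd' (by omega) (by omega)]
      have hq0 : PySem.Int.floordiv a b = 0 := by
        rw [PySem.Int.floordiv_eq_ediv_of_pos (by omega)]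
        exact Int.ediv_eq_zero_of_lt (by omega) (by omega)
      have hm0 : PySem.Int.mod a b = a := by
        rw [PySem.Int.mod_eq_emod_of_pos (by omega)]
        exact Int.emod_eq_of_lt (by omega) (by omega)
      rw [show euclidQs (g2 + 1 + 1) a b
            = 0 :: PySem.Int.floordiv b a :: euclidQs g2 a (PySem.Int.mod b a) from by
          simp only [euclidQs, if_pos (show b ≠ 0 by omega), hq0, hm0,
            if_pos (show a ≠ 0 by omega)],
        finishB_cons, finishB_cons]
      simp

-- ===== VERDICT (by name: the statement is the Claim_ definition above) =====
theorem solve_spec : Claim_equal_solve := by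
  intro a b _ hpre
  unfold Spec_solve solve solve_alt
  by_cases h1 : a = 1 ∨ b = 1
  · rw [if_pos h1, loopA_exit _ _ _ _ _ h1]
    simp
  · rw [if_neg h1]
    rcases hpre with ⟨ha, hb, hg⟩ | h | h
    · rw [loopA_eq_finishB (a.toNat + b.toNat) (a.toNat + b.toNat + 1) a b 0 0
        ha hb hg (le_refl _) (by omega),
        euclidQs_fuel (a.toNat + b.toNat + 1) (a.toNat + b.toNat) a b (by omega)
          (by omega) (by omega)]
      unfold finishB
      split_ifs <;> simp <;> omega
    · exact absurd (Or.inl h) h1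
    · exact absurd (Or.inr h) h1
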